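-- pv_equiv track=rewrite | github.com/Ratven/VKinder-project | vkinder_file.py | sort_data_dict
-- ===== SOURCE A (Python) =====
-- def sort_data_dict(data_dict):
--     """sorts incoming dictionary by key and returns its values in sorted order from max to min"""
--     res_list = []
--     keys_list = list(data_dict.keys())
--     keys_list.sort()
--     keys_list = keys_list[-1:-4:-1]
--     for i in keys_list:
--         res_list.append(data_dict[i])
--     return res_list
-- ===== SOURCE B (Python) =====
-- def sort_data_dict(data_dict):
--     """sorts incoming dictionary by key and returns its values in sorted order from max to min"""
--     # One pass over the keys, maintaining the (at most) 3 largest keys in descending order.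
--     top = []
--     for k in data_dict.keys():
--         pos = 0
--         while pos < len(top) and top[pos] > k:
--             pos += 1
--         top.insert(pos, k)
--         if len(top) > 3:
--             top.pop()
--     return [data_dict[k] for k in top]
-- ===== Notes on version B (the rewrite author's own statement) =====
-- stated objective: alternative
-- what changed: Replaces the full sort of all keys plus a negative-step slice by a single pass that maintains only the three largest keys in descending order, then looks the values up.
import Mathlib
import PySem

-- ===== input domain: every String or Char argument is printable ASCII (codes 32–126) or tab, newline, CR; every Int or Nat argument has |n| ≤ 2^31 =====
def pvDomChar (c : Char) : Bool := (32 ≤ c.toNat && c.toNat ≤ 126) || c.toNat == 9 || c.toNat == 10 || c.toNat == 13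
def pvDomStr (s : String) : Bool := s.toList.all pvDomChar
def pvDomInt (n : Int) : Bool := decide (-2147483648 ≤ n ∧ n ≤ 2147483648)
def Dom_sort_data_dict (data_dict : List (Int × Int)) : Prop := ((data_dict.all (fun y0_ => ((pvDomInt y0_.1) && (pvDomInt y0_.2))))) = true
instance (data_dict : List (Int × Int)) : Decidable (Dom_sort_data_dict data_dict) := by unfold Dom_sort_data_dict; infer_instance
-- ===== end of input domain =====

-- B replaces A's full sort of the keys plus a negative-step slice by a single pass that keeps only
-- the three largest keys in descending order (alternative decomposition, not claimed faster).

-- ===== PORT A =====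
-- A's dict parameter is a PySem.Dict built from the association list; data_dict[i] is getD
-- (the key i always comes from data_dict.keys(), so the KeyError branch is unreachable).
def sort_data_dict (data_dict : List (Int × Int)) : List Int :=
  let dd := PySem.Dict.ofList data_dict
  let res_list : List Int := []
  let keys_list := PySem.List.sorted dd.keys (fun x => x)
  let keys_list2 := (PySem.List.slice? keys_list (some (-1)) (some (-4)) (-1)).getD []
  keys_list2.foldl (fun res_list i => res_list ++ [dd.getD i 0]) res_list

-- ===== PORT B =====
-- Source B's insertion loop 'pos = 0; while …; top.insert(pos, k)' as structural recursion on top.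
def insTop (top : List Int) (k : Int) : List Int :=
  match top with
  | [] => [k]
  | t :: ts => if t > k then t :: insTop ts k else k :: t :: ts

def sort_data_dict_alt (data_dict : List (Int × Int)) : List Int :=
  let dd := PySem.Dict.ofList data_dict
  let top := dd.keys.foldl (fun top k => (insTop top k).take 3) ([] : List Int)
  top.map (fun k => dd.getD k 0)

-- ===== PRECONDITION & SPEC =====
def Spec_sort_data_dict (data_dict : List (Int × Int)) (out : List Int) : Prop := out = sort_data_dict_alt data_dict
instance (data_dict : List (Int × Int)) (out : List Int) : Decidable (Spec_sort_data_dict data_dict out) := by unfold Spec_sort_data_dict; infer_instance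

-- ===== CLAIM (what is proved, stated in full; the proofs are below) =====
def Claim_equal_sort_data_dict : Prop := ∀ (data_dict : List (Int × Int)), Dom_sort_data_dict data_dict → Spec_sort_data_dict data_dict (sort_data_dict data_dict)

-- ===== LEMMAS AND PROOFS =====

lemma insTop_perm (t : List Int) (k : Int) : (insTop t k).Perm (k :: t) := by
  induction t with
  | nil => simp [insTop]
  | cons a ts ih =>
    simp only [insTop]
    split_ifs with h
    · exact ((ih.cons a).trans (List.Perm.swap k a ts)).symm.symm
    · exact List.Perm.refl _

lemma mem_insTop {x : Int} (t : List Int) (k : Int) : x ∈ insTop t k ↔ x = k ∨ x ∈ t := by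
  rw [(insTop_perm t k).mem_iff, List.mem_cons]

lemma insTop_pairwise {t : List Int} {k : Int} (h : t.Pairwise (· > ·)) (hk : k ∉ t) :
    (insTop t k).Pairwise (· > ·) := by
  induction t with
  | nil => simp [insTop]
  | cons a ts ih =>
    rw [List.pairwise_cons] at h
    simp only [List.mem_cons, not_or] at hk
    simp only [insTop]
    split_ifs with hak
    · refine List.pairwise_cons.mpr ⟨?_, ih h.2 hk.2⟩
      intro x hx
      rcases (mem_insTop ts k).mp hx with rfl | hx
      · exact hak
      · exact h.1 x hx
    · have hka : k > a := lt_of_le_of_ne (not_lt.mp hak) (Ne.symm hk.1)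
      refine List.pairwise_cons.mpr ⟨?_, List.pairwise_cons.mpr ⟨h.1, h.2⟩⟩
      intro x hx
      rcases List.mem_cons.mp hx with rfl | hx
      · exact hka
      · exact lt_trans (h.1 x hx) hka

lemma take_insTop (t : List Int) (k : Int) (m : Nat) :
    (insTop (t.take m) k).take m = (insTop t k).take m := by
  induction t generalizing m with
  | nil => simp
  | cons a ts ih =>
    cases m with
    | zero => simp
    | succ m =>
      simp only [List.take_succ_cons, insTop]
      split_ifs with h
      · simp only [List.take_succ_cons, ih m]
      · simp only [List.take_succ_cons]
        cases m with
        | zero => simp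
        | succ n =>
          simp only [List.take_succ_cons]
          rw [List.take_take]
          have hmin : min n (n + 1) = n := by omega
          rw [hmin]

lemma foldl_take3 (ks : List Int) : ∀ acc : List Int,
    ks.foldl (fun t k => (insTop t k).take 3) (acc.take 3) = (ks.foldl insTop acc).take 3 := by
  induction ks with
  | nil => intro acc; simp
  | cons k ks ih =>
    intro acc
    simp only [List.foldl_cons]
    rw [take_insTop, ih (insTop acc k)]

lemma foldl_insTop_sorted (ks : List Int) : ∀ acc : List Int,
    acc.Pairwise (· > ·) → (∀ k ∈ ks, k ∉ acc) → ks.Nodup →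
    (ks.foldl insTop acc).Pairwise (· > ·) ∧ (ks.foldl insTop acc).Perm (ks ++ acc) := by
  induction ks with
  | nil => intro acc h _ _; exact ⟨h, by simp⟩
  | cons k ks ih =>
    intro acc hpw hni hnd
    rw [List.nodup_cons] at hnd
    simp only [List.foldl_cons]
    have hkacc : k ∉ acc := hni k (List.mem_cons_self)
    have hni' : ∀ k' ∈ ks, k' ∉ insTop acc k := by
      intro k' hk' hmem
      rcases (mem_insTop acc k).mp hmem with rfl | hmem
      · exact hnd.1 hk'
      · exact hni k' (List.mem_cons_of_mem _ hk') hmem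
    obtain ⟨h1, h2⟩ := ih (insTop acc k) (insTop_pairwise hpw hkacc) hni' hnd.2
    refine ⟨h1, h2.trans ?_⟩
    exact (List.Perm.append_left ks (insTop_perm acc k)).trans List.perm_middle

lemma filterMap_range_rev (xs : List Int) (m : Nat) :
    List.filterMap (fun (x : Nat) => xs[(-1 + (xs.length:Int) + -(x:Int)).toNat]?) (List.range (min m xs.length))
      = xs.reverse.take m := by
  have h1 : List.filterMap (fun (x : Nat) => xs[(-1 + (xs.length:Int) + -(x:Int)).toNat]?) (List.range (min m xs.length))
      = List.map (fun x => xs.getD (xs.length - 1 - x) 0) (List.range (min m xs.length)) := by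
    rw [← List.filterMap_eq_map]
    apply List.filterMap_congr
    intro x hx
    simp only [List.mem_range] at hx
    have hxn : x < xs.length := lt_of_lt_of_le hx (min_le_right _ _)
    have hidx : (-1 + (xs.length:Int) + -(x:Int)).toNat = xs.length - 1 - x := by omega
    rw [hidx]
    have hlt : xs.length - 1 - x < xs.length := by omega
    simp [List.getElem?_eq_getElem hlt, List.getD_eq_getElem?_getD, Function.comp]
  rw [h1]
  apply List.ext_getElem
  · simp
  · intro i hi1 hi2
    simp at hi1 hi2 ⊢
    have hlt : xs.length - 1 - i < xs.length := by omega
    simp [List.getElem?_eq_getElem hlt]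

lemma slice_neg_take3 (xs : List Int) :
    (PySem.List.slice? xs (some (-1)) (some (-4)) (-1)).getD [] = xs.reverse.take 3 := by
  simp only [PySem.List.slice?, PySem.List.sliceIndices]
  norm_num
  have hc : (if 1 + max (-4 + (xs.length:Int)) (-1) < (xs.length:Int)
      then (-1 + (xs.length:Int) - max (-4 + (xs.length:Int)) (-1)).toNat else 0) = min 3 xs.length := by
    split_ifs with h <;> omega
  rw [hc]
  exact filterMap_range_rev xs 3

-- ===== VERDICT (by name: the statement is the Claim_ definition above) =====
theorem sort_data_dict_spec : Claim_equal_sort_data_dict := by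
  intro data_dict _
  unfold Spec_sort_data_dict sort_data_dict sort_data_dict_alt
  simp only []
  set dd := PySem.Dict.ofList data_dict with hdd
  set ks := dd.keys with hks
  have hnd : ks.Nodup := PySem.Dict.nodup_keys_ofList data_dict
  set D := ks.foldl insTop [] with hD
  obtain ⟨hpw, hperm⟩ := foldl_insTop_sorted ks [] (by simp) (by simp) hnd
  have hperm' : D.Perm ks := by simpa using hperm
  have hsorted : PySem.List.sorted ks (fun x => x) = D.reverse := by
    apply PySem.List.sorted_eq_of_perm_of_pairwise_lt
    · exact (List.reverse_perm D).trans hperm'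
    · exact List.pairwise_reverse.mpr hpw
  rw [hsorted, slice_neg_take3, List.reverse_reverse]
  rw [PySem.List.foldl_append_singleton_eq_map (fun i => dd.getD i 0)]
  have hB : ks.foldl (fun t k => (insTop t k).take 3) ([] : List Int) = D.take 3 := by
    have := foldl_take3 ks []
    simpa using this
  rw [hB]
  simp
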